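-- pv_equiv track=rewrite | github.com/mirazchiev/SoftUni | Fundamentals/Text Processing/Exercise/character_multiplier.py | char_multiplier
-- ===== SOURCE A (Python) =====
-- def char_multiplier(strings: list) -> int:
--     first_word = strings[0]
--     second_word = strings[1]
--     total = 0
--     if len(first_word) == len(second_word):
--         for char_index in range(len(first_word)):
--             total += ord(first_word[char_index]) * ord(second_word[char_index])
--     else:
--         if len(first_word) > len(second_word):
--             longer = first_word
--             shorter = second_word
--         else:
--             longer = second_word
--             shorter = first_word
--         for char_index in range(len(shorter)):
--             total += ord(shorter[char_index]) * ord(longer[char_index])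
--         for char_index in range(len(shorter), len(longer)):
--             total += ord(longer[char_index])
--
--     return total
-- ===== SOURCE B (Python) =====
-- def char_multiplier(strings: list) -> int:
--     it_f = iter(strings[0])
--     it_s = iter(strings[1])
--     total = 0
--     while True:
--         a = next(it_f, None)
--         b = next(it_s, None)
--         if a is None and b is None:
--             return total
--         if a is None:
--             total += ord(b)
--         elif b is None:
--             total += ord(a)
--         else:
--             total += ord(a) * ord(b)
-- ===== Notes on version B (the rewrite author's own statement) =====
-- stated objective: simpler
-- what changed: Replaces A's three-way branching (equal-length case, longer/shorter selection, and two staged index loops) with one lockstep pass over paired iterators of both strings: multiply while both yield, add the plain ord once either is exhausted; no length comparison or index arithmetic remains.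
import Mathlib
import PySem

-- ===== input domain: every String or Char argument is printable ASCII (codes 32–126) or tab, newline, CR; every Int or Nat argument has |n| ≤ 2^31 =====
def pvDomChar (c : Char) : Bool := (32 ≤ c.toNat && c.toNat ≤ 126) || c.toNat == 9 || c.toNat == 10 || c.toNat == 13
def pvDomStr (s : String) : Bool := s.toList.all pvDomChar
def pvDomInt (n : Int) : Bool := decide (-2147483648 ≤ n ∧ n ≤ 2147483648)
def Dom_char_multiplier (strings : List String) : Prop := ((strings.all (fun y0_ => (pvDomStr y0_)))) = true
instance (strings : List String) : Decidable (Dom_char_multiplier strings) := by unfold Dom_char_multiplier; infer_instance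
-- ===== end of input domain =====

-- B replaces A's three-way branching and staged index loops with one lockstep pass
-- over paired iterators of both strings. Equivalence is about the return value;
-- Pre_ excludes inputs with fewer than two strings, where A raises IndexError.

-- ===== PORT A =====
-- ord of the character at index i (indices used by A are always in range)
def pvOrdAt (l : List Char) (i : Nat) : Int := ((l.getD i ' ').toNat : Int)

def char_multiplier (strings : List String) : Int :=
  let first_word := (strings.getD 0 "").toList
  let second_word := (strings.getD 1 "").toList
  if first_word.length = second_word.length then
    (List.range first_word.length).foldl
      (fun total i => total + pvOrdAt first_word i * pvOrdAt second_word i) 0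
  else
    let lp := if first_word.length > second_word.length
      then (first_word, second_word) else (second_word, first_word)
    let longer := lp.1
    let shorter := lp.2
    let t1 := (List.range shorter.length).foldl
      (fun total i => total + pvOrdAt shorter i * pvOrdAt longer i) 0
    (List.range' shorter.length (longer.length - shorter.length)).foldl
      (fun total i => total + pvOrdAt longer i) t1

-- ===== PORT B =====
-- Source B's lockstep while-loop over paired iterators, as structural recursion on the two char streams (same branch order)
def pvGo : List Char → List Char → Int
  | [], [] => 0
  | [], b :: s => ((b.toNat : Int)) + pvGo [] s
  | a :: f, [] => ((a.toNat : Int)) + pvGo f []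
  | a :: f, b :: s => ((a.toNat : Int)) * ((b.toNat : Int)) + pvGo f s

def char_multiplier_alt (strings : List String) : Int :=
  pvGo (strings.getD 0 "").toList (strings.getD 1 "").toList

-- ===== PRECONDITION & SPEC =====
-- Pre_ excludes lists with fewer than two strings, on which A raises IndexError.
def Pre_char_multiplier (strings : List String) : Prop := 2 ≤ strings.length
instance (strings : List String) : Decidable (Pre_char_multiplier strings) := by unfold Pre_char_multiplier; infer_instance
def pvWitness_char_multiplier : List String := (["abc", "de"])
def Spec_char_multiplier (strings : List String) (out : Int) : Prop := out = char_multiplier_alt strings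
instance (strings : List String) (out : Int) : Decidable (Spec_char_multiplier strings out) := by unfold Spec_char_multiplier; infer_instance

-- ===== CLAIM (what is proved, stated in full; the proofs are below) =====
def Claim_equal_char_multiplier : Prop := ∀ (strings : List String), Dom_char_multiplier strings → Pre_char_multiplier strings → Spec_char_multiplier strings (char_multiplier strings)

-- ===== LEMMAS AND PROOFS =====

-- a foldl-accumulated loop is the sum of the mapped list
theorem pv_foldl_add (l : List Nat) (g : Nat → Int) (a : Int) :
    l.foldl (fun t i => t + g i) a = a + (l.map g).sum := by
  induction l generalizing a with
  | nil => simp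
  | cons x xs ih => simp [List.foldl, ih, add_assoc]

-- the index-loop product sum over the common prefix equals the zipWith sum
theorem pv_zip_sum (f s : List Char) (h : f.length ≤ s.length) :
    ((List.range f.length).map (fun i => pvOrdAt f i * pvOrdAt s i)).sum
      = (List.zipWith (fun a b => ((a.toNat : Int)) * ((b.toNat : Int))) f s).sum := by
  induction f generalizing s with
  | nil => simp
  | cons a f' ih =>
    cases s with
    | nil => simp at h
    | cons b s' =>
      simp only [List.length_cons, List.range_succ_eq_map, List.map_cons, List.map_map,
        List.zipWith_cons_cons, List.sum_cons]
      have : ((List.range f'.length).map (fun i => pvOrdAt (a :: f') (i + 1) * pvOrdAt (b :: s') (i + 1))).sum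
          = ((List.range f'.length).map (fun i => pvOrdAt f' i * pvOrdAt s' i)).sum := by
        simp [pvOrdAt]
      simp only [Function.comp_def, Nat.succ_eq_add_one]
      rw [this, ih s' (by simpa using h)]
      rfl

-- the tail loop over range' equals the sum over the dropped suffix
theorem pv_tail_sum (t : List Char) : ∀ (l : List Char) (k : Nat), l.drop k = t →
    ((List.range' k t.length).map (fun i => pvOrdAt l i)).sum
      = (t.map (fun c => ((c.toNat : Int)))).sum := by
  induction t with
  | nil => simp
  | cons c t' ih =>
    intro l k hd
    have hk : l[k]? = some c := by
      have h0 : (l.drop k)[0]? = some c := by rw [hd]; rfl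
      rw [List.getElem?_drop] at h0; simpa using h0
    have hd' : l.drop (k + 1) = t' := by
      have : (l.drop k).drop 1 = t' := by rw [hd]; rfl
      simpa [List.drop_drop, Nat.add_comm] using this
    simp only [List.length_cons, List.range'_succ, List.map_cons, List.sum_cons]
    rw [ih l (k + 1) hd']
    have : pvOrdAt l k = ((c.toNat : Int)) := by
      simp [pvOrdAt, List.getD_eq_getElem?_getD, hk]
    rw [this]

theorem pv_tail_sum' (l : List Char) (k : Nat) :
    ((List.range' k (l.length - k)).map (pvOrdAt l)).sum
      = ((l.drop k).map (fun c => ((c.toNat : Int)))).sum := by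
  have h := pv_tail_sum (l.drop k) l k rfl
  simpa using h

-- zipWith product sum is symmetric
theorem pv_zip_comm (f s : List Char) :
    (List.zipWith (fun a b => ((a.toNat : Int)) * ((b.toNat : Int))) f s).sum
      = (List.zipWith (fun a b => ((a.toNat : Int)) * ((b.toNat : Int))) s f).sum := by
  induction f generalizing s with
  | nil => simp
  | cons a f' ih =>
    cases s with
    | nil => simp
    | cons b s' => simp [ih s', mul_comm]

-- the lockstep loop against the exhausted string sums plain ords
theorem pv_go_nil_right (f : List Char) :
    pvGo f [] = (f.map (fun c => ((c.toNat : Int)))).sum := by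
  induction f with
  | nil => simp [pvGo]
  | cons c t ih => simp [pvGo, ih]

-- characterisation of B's lockstep recursion: product sum over the common
-- prefix plus the plain ord sums of whichever tail remains
theorem pv_go_eq (f : List Char) : ∀ (s : List Char),
    pvGo f s = (List.zipWith (fun a b => ((a.toNat : Int)) * ((b.toNat : Int))) f s).sum
      + ((f.drop s.length).map (fun c => ((c.toNat : Int)))).sum
      + ((s.drop f.length).map (fun c => ((c.toNat : Int)))).sum := by
  induction f with
  | nil =>
    intro s
    induction s with
    | nil => simp [pvGo]
    | cons b s' ihs => simp [pvGo, ihs]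
  | cons a f' ih =>
    intro s
    cases s with
    | nil => simp [pv_go_nil_right]
    | cons b s' =>
      simp only [pvGo, ih s', List.zipWith_cons_cons, List.sum_cons,
        List.length_cons, List.drop_succ_cons]
      ring

theorem pv_main (strings : List String) :
    char_multiplier strings = char_multiplier_alt strings := by
  unfold char_multiplier char_multiplier_alt
  set f := (strings.getD 0 "").toList with hf
  set s := (strings.getD 1 "").toList with hs
  rw [pv_go_eq]
  by_cases heq : f.length = s.length
  · rw [if_pos heq, pv_foldl_add, pv_zip_sum f s (le_of_eq heq)]
    have h1 : f.drop s.length = [] := by rw [← heq]; simp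
    have h2 : s.drop f.length = [] := by rw [heq]; simp
    simp [h1, h2]
  · rw [if_neg heq]
    by_cases hgt : f.length > s.length
    · rw [if_pos hgt]
      simp only
      rw [pv_foldl_add, pv_foldl_add, pv_zip_sum s f (le_of_lt hgt), pv_zip_comm,
        pv_tail_sum' f s.length]
      have h2 : s.drop f.length = [] := List.drop_eq_nil_of_le (le_of_lt hgt)
      simp [h2, add_comm]
    · rw [if_neg hgt]
      simp only
      have hle : f.length ≤ s.length := by omega
      rw [pv_foldl_add, pv_foldl_add, pv_zip_sum f s hle, pv_tail_sum' s f.length]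
      have h1 : f.drop s.length = [] := List.drop_eq_nil_of_le hle
      simp [h1, add_comm]

-- ===== VERDICT (by name: the statement is the Claim_ definition above) =====
theorem char_multiplier_spec : Claim_equal_char_multiplier := by
  intro strings _ _
  exact pv_main strings
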